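-- pv_equiv track=rewrite | github.com/pachecowillians/functional-programming | LISTA 5/code/9.py | contaConsoante1
-- ===== SOURCE A (Python) =====
-- def ehVogal(c):
-- 	return True if c in "aeiouAEIOU" else False
--
-- def contaConsoante1(s,i=0,cont=0):
-- 	if i<len(s):
-- 		if ehVogal(s[i]):
-- 			return contaConsoante1(s,i+1,cont)
-- 		else:
-- 			return contaConsoante1(s,i+1,cont+1)
-- 	else:
-- 		return cont
-- ===== SOURCE B (Python) =====
-- def contaConsoante1(s, i=0, cont=0):
--     return cont + sum(1 for c in s[i:] if c not in "aeiouAEIOU")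
-- ===== Notes on version B (the rewrite author's own statement) =====
-- stated objective: simpler
-- what changed: Replaced the index-carrying tail recursion by a single comprehension-sum over the slice s[i:], inlining the vowel membership test.
-- intended difference: For -len(s) <= i < 0 on strings containing a non-vowel, A's negative-index wraparound makes it count s[i:] and then the whole string again, while B returns the intended non-vowel count of the slice alone. — e.g. on contaConsoante1("abc", -2, 0): A returns 4, B returns 2
import Mathlib
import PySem

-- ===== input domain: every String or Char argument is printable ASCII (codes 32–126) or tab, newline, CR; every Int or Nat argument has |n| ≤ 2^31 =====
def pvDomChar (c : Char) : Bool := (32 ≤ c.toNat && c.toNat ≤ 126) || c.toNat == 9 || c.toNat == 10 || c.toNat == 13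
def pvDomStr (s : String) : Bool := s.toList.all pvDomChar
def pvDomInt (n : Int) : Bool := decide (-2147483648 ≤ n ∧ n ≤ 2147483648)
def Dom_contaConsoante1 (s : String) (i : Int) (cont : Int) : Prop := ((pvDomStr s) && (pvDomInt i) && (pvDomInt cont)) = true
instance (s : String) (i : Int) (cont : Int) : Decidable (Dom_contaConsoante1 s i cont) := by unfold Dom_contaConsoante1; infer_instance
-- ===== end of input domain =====

-- B replaces A's index-carrying tail recursion by a single sum over the slice s[i:] (objective: simpler).

-- ===== PORT A =====
def ehVogal (c : Char) : Bool := if ("aeiouAEIOU".toList.contains c) then true else false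

-- the recursion of A, driven by the decreasing fuel ((len s) - i).toNat; fuel = 0 ↔ the guard i < len(s) fails
def contaC1go (s : String) : Nat → Int → Int → Int
  | 0, _, cont => cont
  | f+1, i, cont =>
    match PySem.Str.pyGet? s i with
    | some c => if ehVogal c then contaC1go s f (i+1) cont else contaC1go s f (i+1) (cont+1)
    | none => 0   -- IndexError in Python (i < -len(s)); excluded by Pre_

def contaConsoante1 (s : String) (i : Int) (cont : Int) : Int :=
  contaC1go s ((s.toList.length : Int) - i).toNat i cont

-- ===== PORT B =====
def contaConsoante1_alt (s : String) (i : Int) (cont : Int) : Int :=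
  cont + (((PySem.Str.slice s (some i) none).toList.countP
             (fun c => !("aeiouAEIOU".toList.contains c)) : Nat) : Int)

-- ===== PRECONDITION & SPEC =====
-- Pre_ excludes exactly the inputs (i < -len(s)) on which A raises IndexError.
def Pre_contaConsoante1 (s : String) (i : Int) (cont : Int) : Prop :=
  -(s.toList.length : Int) ≤ i
instance (s : String) (i : Int) (cont : Int) : Decidable (Pre_contaConsoante1 s i cont) := by unfold Pre_contaConsoante1; infer_instance
def pvWitness_contaConsoante1 : String × Int × Int := ("banana", 0, 0)

-- For -len(s) ≤ i < 0 on strings containing a non-vowel, A's negative-index wraparound counts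
-- s[i:] and then the whole string again; B returns the intended count of s[i:] alone.
def D_contaConsoante1 (s : String) (i : Int) (cont : Int) : Prop :=
  i < 0 ∧ ¬ (∀ c ∈ s.toList, c ∈ ['a','e','i','o','u','A','E','I','O','U'])
instance (s : String) (i : Int) (cont : Int) : Decidable (D_contaConsoante1 s i cont) := by unfold D_contaConsoante1; infer_instance

def Spec_contaConsoante1 (s : String) (i : Int) (cont : Int) (out : Int) : Prop :=
  ¬ D_contaConsoante1 s i cont → out = contaConsoante1_alt s i cont
instance (s : String) (i : Int) (cont : Int) (out : Int) : Decidable (Spec_contaConsoante1 s i cont out) := by unfold Spec_contaConsoante1; infer_instance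

def pvDiffWitness_contaConsoante1 : String × Int × Int := ("abc", -2, 0)
def pvDiffWitnessOut_contaConsoante1 : Int × Int := (4, 2)

-- ===== CLAIM (what is proved, stated in full; the proofs are below) =====
def Claim_unchanged_contaConsoante1 : Prop := ∀ (s : String) (i : Int) (cont : Int), Dom_contaConsoante1 s i cont → Pre_contaConsoante1 s i cont → Spec_contaConsoante1 s i cont (contaConsoante1 s i cont)
def Claim_changed_contaConsoante1 : Prop := Dom_contaConsoante1 (pvDiffWitness_contaConsoante1.1) (pvDiffWitness_contaConsoante1.2.1) (pvDiffWitness_contaConsoante1.2.2) ∧ Pre_contaConsoante1 (pvDiffWitness_contaConsoante1.1) (pvDiffWitness_contaConsoante1.2.1) (pvDiffWitness_contaConsoante1.2.2) ∧ D_contaConsoante1 (pvDiffWitness_contaConsoante1.1) (pvDiffWitness_contaConsoante1.2.1) (pvDiffWitness_contaConsoante1.2.2) ∧ contaConsoante1 (pvDiffWitness_contaConsoante1.1) (pvDiffWitness_contaConsoante1.2.1) (pvDiffWitness_contaConsoante1.2.2) = pvDiffWitnessOut_contaConsoante1.1 ∧ contaConsoante1_alt (pvDiffWitness_contaConsoante1.1)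 (pvDiffWitness_contaConsoante1.2.1) (pvDiffWitness_contaConsoante1.2.2) = pvDiffWitnessOut_contaConsoante1.2 ∧ pvDiffWitnessOut_contaConsoante1.1 ≠ pvDiffWitnessOut_contaConsoante1.2
def Claim_exact_contaConsoante1 : Prop := ∀ (s : String) (i : Int) (cont : Int), Dom_contaConsoante1 s i cont → Pre_contaConsoante1 s i cont → D_contaConsoante1 s i cont → contaConsoante1 s i cont ≠ contaConsoante1_alt s i cont

-- ===== LEMMAS AND PROOFS =====

-- The fuel-driven loop of A on a nonnegative index counts the non-vowels of the dropped suffix.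
theorem go_pos (s : String) : ∀ (f : Nat) (k : Nat) (cont : Int), f = s.toList.length - k →
    contaC1go s f (k : Int) cont
      = cont + (((s.toList.drop k).countP (fun c => !("aeiouAEIOU".toList.contains c)) : Nat) : Int) := by
  intro f
  induction f with
  | zero =>
    intro k cont hf
    rw [List.drop_eq_nil_of_le (by omega)]
    simp [contaC1go]
  | succ f ih =>
    intro k cont hf
    have hk : k < s.toList.length := by omega
    have hget : PySem.Str.pyGet? s (k : Int) = some (s.toList[k]'hk) := by
      simp [List.getElem?_eq_getElem hk]
    rw [contaC1go, hget]
    dsimp only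
    have hdrop : s.toList.drop k = s.toList[k]'hk :: s.toList.drop (k+1) :=
      List.drop_eq_getElem_cons hk
    have hcast : (k : Int) + 1 = ((k+1 : Nat) : Int) := by push_cast; ring
    by_cases hv : ehVogal (s.toList[k]'hk)
    · rw [if_pos hv, hcast, ih (k+1) cont (by omega)]
      have hc : ("aeiouAEIOU".toList.contains (s.toList[k]'hk)) = true := by
        simpa [ehVogal] using hv
      rw [hdrop, List.countP_cons, hc]
      simp
    · rw [if_neg hv, hcast, ih (k+1) (cont+1) (by omega)]
      have hc : ("aeiouAEIOU".toList.contains (s.toList[k]'hk)) = false := by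
        simpa [ehVogal] using hv
      rw [hdrop, List.countP_cons, hc]
      simp
      omega

-- A on a nonnegative index counts the non-vowels of the dropped suffix.
theorem contaA_pos (s : String) (k : Nat) (cont : Int) :
    contaConsoante1 s (k : Int) cont
      = cont + (((s.toList.drop k).countP (fun c => !("aeiouAEIOU".toList.contains c)) : Nat) : Int) := by
  unfold contaConsoante1
  rw [show ((s.toList.length : Int) - (k : Int)).toNat = s.toList.length - k by omega]
  exact go_pos s _ k cont rfl

-- A on a negative index -n (0 ≤ n ≤ len) counts the suffix from len-n, then the whole string.
theorem contaA_neg (s : String) (n : Nat) (hn : n ≤ s.toList.length) (cont : Int) :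
    contaConsoante1 s (-(n : Int)) cont
      = cont + (((s.toList.drop (s.toList.length - n)).countP (fun c => !("aeiouAEIOU".toList.contains c)) : Nat) : Int)
            + ((s.toList.countP (fun c => !("aeiouAEIOU".toList.contains c)) : Nat) : Int) := by
  have main : ∀ (n : Nat), n ≤ s.toList.length → ∀ (cont : Int),
      contaC1go s (s.toList.length + n) (-(n : Int)) cont
        = cont + (((s.toList.drop (s.toList.length - n)).countP (fun c => !("aeiouAEIOU".toList.contains c)) : Nat) : Int)
              + ((s.toList.countP (fun c => !("aeiouAEIOU".toList.contains c)) : Nat) : Int) := by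
    intro n
    induction n with
    | zero =>
      intro _ cont
      rw [show (-((0:Nat) : Int)) = ((0:Nat) : Int) by norm_num,
          go_pos s (s.toList.length + 0) 0 cont (by omega)]
      simp only [Nat.sub_zero, List.drop_length, List.countP_nil, List.drop_zero, Nat.cast_zero]
      omega
    | succ n ih =>
      intro hn cont
      have hlt : s.toList.length - (n+1) < s.toList.length := by omega
      rw [show s.toList.length + (n+1) = (s.toList.length + n) + 1 by omega]
      have hget : PySem.Str.pyGet? s (-((n+1 : Nat) : Int))
          = some (s.toList[s.toList.length - (n+1)]'hlt) := by
        rw [PySem.Str.pyGet?_eq, PySem.Chars.pyGet?_eq_listPyGet?,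
            PySem.List.pyGet?_neg_natCast _ _ (by omega) hn]
        simp
      rw [contaC1go, hget]
      dsimp only
      have hcast : (-((n+1 : Nat) : Int)) + 1 = -((n : Nat) : Int) := by push_cast; ring
      have hdrop : s.toList.drop (s.toList.length - (n+1))
          = s.toList[s.toList.length - (n+1)]'hlt :: s.toList.drop (s.toList.length - n) := by
        have := List.drop_eq_getElem_cons hlt
        rwa [show s.toList.length - (n+1) + 1 = s.toList.length - n by omega] at this
      by_cases hv : ehVogal (s.toList[s.toList.length - (n+1)]'hlt)
      · rw [if_pos hv, hcast, ih (by omega) cont]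
        have hc : ("aeiouAEIOU".toList.contains (s.toList[s.toList.length - (n+1)]'hlt)) = true := by
          simpa [ehVogal] using hv
        rw [hdrop, List.countP_cons, hc]
        simp
      · rw [if_neg hv, hcast, ih (by omega) (cont+1)]
        have hc : ("aeiouAEIOU".toList.contains (s.toList[s.toList.length - (n+1)]'hlt)) = false := by
          simpa [ehVogal] using hv
        rw [hdrop, List.countP_cons, hc]
        simp
        omega
  unfold contaConsoante1
  rw [show ((s.toList.length : Int) - (-(n : Int))).toNat = s.toList.length + n by omega]
  exact main n hn cont

-- B on a nonnegative index: cont plus the non-vowel count of the dropped suffix.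
theorem altB_nonneg (s : String) (k : Nat) (cont : Int) :
    contaConsoante1_alt s (k : Int) cont
      = cont + (((s.toList.drop k).countP (fun c => !("aeiouAEIOU".toList.contains c)) : Nat) : Int) := by
  unfold contaConsoante1_alt
  rw [PySem.Str.toList_slice, PySem.Chars.slice_eq_listSlice, PySem.List.slice_from_natCast]

-- B on a negative index -n (0 < n): cont plus the non-vowel count of the suffix from len-n.
theorem altB_neg (s : String) (n : Nat) (h : 0 < n) (cont : Int) :
    contaConsoante1_alt s (-(n : Int)) cont
      = cont + (((s.toList.drop (s.toList.length - n)).countP (fun c => !("aeiouAEIOU".toList.contains c)) : Nat) : Int) := by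
  unfold contaConsoante1_alt
  rw [PySem.Str.toList_slice, PySem.Chars.slice_eq_listSlice,
      PySem.List.slice_from_neg_natCast _ _ h]

theorem vowel_contains (c : Char) :
    ("aeiouAEIOU".toList.contains c) = true ↔ c ∈ ['a','e','i','o','u','A','E','I','O','U'] := by
  rw [show "aeiouAEIOU".toList = ['a','e','i','o','u','A','E','I','O','U'] from rfl]
  exact List.contains_iff_mem

theorem cnt_zero_of_all_vowel (l : List Char)
    (hall : ∀ c ∈ l, ("aeiouAEIOU".toList.contains c) = true) :
    l.countP (fun c => !("aeiouAEIOU".toList.contains c)) = 0 :=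
  List.countP_eq_zero.mpr (fun a ha => by simp only [hall a ha]; decide)

-- ===== VERDICT (by name: the statement is the Claim_ definition above) =====
theorem contaConsoante1_spec : Claim_unchanged_contaConsoante1 := by
  intro s i cont _ hpre hnd
  by_cases hi : 0 ≤ i
  · obtain ⟨k, rfl⟩ := Int.eq_ofNat_of_zero_le hi
    rw [contaA_pos, altB_nonneg]
  · have hneg : i < 0 := by omega
    have hall' : ∀ c ∈ s.toList, c ∈ ['a','e','i','o','u','A','E','I','O','U'] := by
      by_contra h
      exact hnd ⟨hneg, h⟩
    have hall : ∀ c ∈ s.toList, ("aeiouAEIOU".toList.contains c) = true := by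
      intro c hc
      exact (vowel_contains c).mpr (hall' c hc)
    have hpre' : -(s.toList.length : Int) ≤ i := hpre
    have hi' : i = -(((-i).toNat : Nat) : Int) := by omega
    rw [hi', contaA_neg s (-i).toNat (by omega), altB_neg s (-i).toNat (by omega)]
    rw [cnt_zero_of_all_vowel _ (fun c hc => hall c (List.mem_of_mem_drop hc)),
        cnt_zero_of_all_vowel _ hall]
    simp

theorem contaConsoante1_changed : Claim_changed_contaConsoante1 := by
  unfold Claim_changed_contaConsoante1
  refine ⟨by decide, by decide, ?_, ?_, by decide, by decide⟩
  · exact ⟨by decide, fun h => absurd (h 'b' (by decide)) (by decide)⟩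
  show contaConsoante1 "abc" (-2) 0 = 4
  rw [show ((-2 : Int)) = -((2 : Nat) : Int) by norm_num, contaA_neg "abc" 2 (by decide)]
  decide

theorem contaConsoante1_tight : Claim_exact_contaConsoante1 := by
  intro s i cont _ hpre hD
  obtain ⟨hneg, hnall⟩ := hD
  push_neg at hnall
  obtain ⟨c, hc, hcm⟩ := hnall
  have hpre' : -(s.toList.length : Int) ≤ i := hpre
  have hi' : i = -(((-i).toNat : Nat) : Int) := by omega
  rw [hi', contaA_neg s (-i).toNat (by omega), altB_neg s (-i).toNat (by omega)]
  have hpc : (fun c => !("aeiouAEIOU".toList.contains c)) c = true := by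
    cases hb : ("aeiouAEIOU".toList.contains c) with
    | true => exact absurd ((vowel_contains c).mp hb) hcm
    | false => show (!("aeiouAEIOU".toList.contains c)) = true; rw [hb]; rfl
  have hpos : s.toList.countP (fun c => !("aeiouAEIOU".toList.contains c)) ≠ 0 :=
    fun h0 => (List.countP_eq_zero.mp h0 c hc) hpc
  omega
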